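-- pv_equiv track=rewrite | github.com/vvoinarovych/Alg_ds_lab | lab2/DzielIRzadz.py | najwiekszyElementWektora
-- ===== SOURCE A (Python) =====
-- def najwiekszyElementWektora(wektor):
--     # Sprawdzamy, czy wektor jest pusty
--     if len(wektor) == 0:
--         return None
--
--     # Sprawdzamy, czy wektor zawiera tylko jeden element
--     if len(wektor) == 1:
--         return wektor[0]
--
--     # Dzielimy wektor na dwie części
--     srodek = len(wektor) // 2
--     lewaCzesc = wektor[:srodek]
--     prawaCzesc = wektor[srodek:]
--
--     # Rekurencyjnie sukamy największy element w obu częściach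
--     najwiekszyL = najwiekszyElementWektora(lewaCzesc)
--     najwiekszyP = najwiekszyElementWektora(prawaCzesc)
--
--     # Porównaj wyniki i zwróć większy element
--     return max(najwiekszyL, najwiekszyP)
--
-- wektor = [4, 9, 2, 6, 5, 1, 8, 3, 7]
-- ===== SOURCE B (Python) =====
-- def najwiekszyElementWektora(wektor):
--     # flat single pass with a running maximum instead of recursive divide-and-conquer
--     if len(wektor) == 0:
--         return None
--     best = wektor[0]
--     for x in wektor[1:]:
--         if x > best:
--             best = x
--     return best
-- ===== Notes on version B (the rewrite author's own statement) =====
-- stated objective: simpler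
-- what changed: Replaced the recursive divide-and-conquer (slice the list in halves, recurse, merge with max) by a single flat pass maintaining a running maximum.
import Mathlib
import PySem

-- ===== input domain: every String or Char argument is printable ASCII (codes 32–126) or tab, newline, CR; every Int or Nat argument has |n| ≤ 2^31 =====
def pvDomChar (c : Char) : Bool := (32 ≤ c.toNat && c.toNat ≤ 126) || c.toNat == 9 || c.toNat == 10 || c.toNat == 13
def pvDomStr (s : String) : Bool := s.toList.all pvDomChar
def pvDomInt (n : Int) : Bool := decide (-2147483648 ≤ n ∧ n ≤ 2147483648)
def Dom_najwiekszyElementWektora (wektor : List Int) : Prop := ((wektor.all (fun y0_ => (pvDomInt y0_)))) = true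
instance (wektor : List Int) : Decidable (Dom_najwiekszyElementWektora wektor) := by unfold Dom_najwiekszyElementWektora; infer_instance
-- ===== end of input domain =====

-- B replaces A's recursive divide-and-conquer maximum by a single flat pass with a running maximum (simpler).


-- ===== PORT A =====
-- Python's max(x, y) on the two recursive results; both parts are nonempty so both are `some`
def pyMaxOpt (a b : Option Int) : Option Int :=
  match a, b with
  | some x, some y => some (max x y)
  | _, _ => none

def najwiekszyElementWektora (wektor : List Int) : Option Int :=
  if wektor.length = 0 then none
  else if wektor.length = 1 then PySem.List.pyGet? wektor 0
  else
    let srodek := wektor.length / 2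
    let lewaCzesc := wektor.take srodek
    let prawaCzesc := wektor.drop srodek
    pyMaxOpt (najwiekszyElementWektora lewaCzesc) (najwiekszyElementWektora prawaCzesc)
termination_by wektor.length
decreasing_by
  · simp only [List.length_take]; omega
  · simp only [List.length_drop]; omega

-- ===== PORT B =====
def najwiekszyElementWektora_alt (wektor : List Int) : Option Int :=
  match wektor with
  | [] => none
  | x :: xs => some (xs.foldl (fun best v => if v > best then v else best) x)

-- ===== PRECONDITION & SPEC =====
def Spec_najwiekszyElementWektora (wektor : List Int) (out : Option Int) : Prop := out = najwiekszyElementWektora_alt wektor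
instance (wektor : List Int) (out : Option Int) : Decidable (Spec_najwiekszyElementWektora wektor out) := by unfold Spec_najwiekszyElementWektora; infer_instance

-- ===== CLAIM (what is proved, stated in full; the proofs are below) =====
def Claim_equal_najwiekszyElementWektora : Prop := ∀ (wektor : List Int), Dom_najwiekszyElementWektora wektor → Spec_najwiekszyElementWektora wektor (najwiekszyElementWektora wektor)

-- ===== LEMMAS AND PROOFS =====

-- B's running-max update is Int's max
theorem alt_eq_max? (l : List Int) : najwiekszyElementWektora_alt l = l.max? := by
  cases l with
  | nil => rfl
  | cons x xs =>
    simp only [najwiekszyElementWektora_alt, List.max?]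
    have hmax : (fun (best v : Int) => if v > best then v else best) = max := by
      funext b v
      simp only [max_def]
      split <;> split <;> omega
    rw [hmax]

theorem foldl_max_shift (l : List Int) (a b : Int) :
    List.foldl max (max a b) l = max a (List.foldl max b l) := by
  induction l generalizing b with
  | nil => rfl
  | cons c l ih => simpa [max_assoc] using ih (max b c)

theorem max?_append_ne (l r : List Int) (hl : l ≠ []) (hr : r ≠ []) :
    (l ++ r).max? = pyMaxOpt l.max? r.max? := by
  cases l with
  | nil => exact absurd rfl hl
  | cons x xs =>
    cases r with
    | nil => exact absurd rfl hr
    | cons y ys =>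
      simp only [List.cons_append, List.max?, pyMaxOpt]
      rw [List.foldl_append, List.foldl_cons, foldl_max_shift]

theorem A_eq_max?_aux : ∀ (n : Nat) (l : List Int), l.length = n → najwiekszyElementWektora l = l.max? := by
  intro n
  induction n using Nat.strong_induction_on with
  | _ n ih =>
    intro l hn
    rw [najwiekszyElementWektora]
    by_cases h0 : l.length = 0
    · simp [List.eq_nil_of_length_eq_zero h0]
    · by_cases h1 : l.length = 1
      · match l, h1 with
        | [x], _ => simp [List.max?, PySem.List.pyGet?, PySem.List.pyIdx?]
      · simp only [if_neg h0, if_neg h1]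
        rw [ih (l.take (l.length / 2)).length (by rw [List.length_take]; omega) _ rfl,
            ih (l.drop (l.length / 2)).length (by rw [List.length_drop]; omega) _ rfl,
            ← max?_append_ne, List.take_append_drop]
        · apply List.ne_nil_of_length_pos
          rw [List.length_take]
          omega
        · apply List.ne_nil_of_length_pos
          rw [List.length_drop]
          omega

theorem A_eq_max? (l : List Int) : najwiekszyElementWektora l = l.max? :=
  A_eq_max?_aux l.length l rfl

-- ===== VERDICT (by name: the statement is the Claim_ definition above) =====
theorem najwiekszyElementWektora_spec : Claim_equal_najwiekszyElementWektora := by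
  intro wektor _
  unfold Spec_najwiekszyElementWektora
  rw [A_eq_max?, alt_eq_max?]
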